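-- pv_equiv track=rewrite | github.com/justinpo/141 | MPA1-3/main.py | hasDuplicateVar
-- ===== SOURCE A (Python) =====
-- def hasDataType(line) -> bool:
--     if "double" in line or "int" in line or "char" in line or "float" in line or "void" in line or "return" in line:
--         return True
--     else:
--         return False
--
-- def hasDuplicateVar(tokens) -> bool:
--     variables = []
--     for token in tokens:
--         if "=" in token:
--             variables.append(token.split("=")[0])
--         elif not hasDataType(token):
--             variables.append(token)
--     if len(variables) == len(set(variables)):
--         return False
--     else:
--         return True
-- ===== SOURCE B (Python) =====
-- def hasDataType(line) -> bool:
--     if "double" in line or "int" in line or "char" in line or "float" in line or "void" in line or "return" in line: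
--         return True
--     else:
--         return False
--
-- def _name(token):
--     if "=" in token:
--         return token.split("=")[0]
--     if not hasDataType(token):
--         return token
--     return None
--
-- def hasDuplicateVar(tokens) -> bool:
--     names = sorted(n for n in map(_name, tokens) if n is not None)
--     for a, b in zip(names, names[1:]):
--         if a == b:
--             return True
--     return False
-- ===== Notes on version B (the rewrite author's own statement) =====
-- stated objective: alternative
-- what changed: Detects duplicates by sorting the extracted names and scanning for an equal adjacent pair (sort-based duplicate detection), instead of A's building the full name list and comparing its length with the length of its set.
import Mathlib
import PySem

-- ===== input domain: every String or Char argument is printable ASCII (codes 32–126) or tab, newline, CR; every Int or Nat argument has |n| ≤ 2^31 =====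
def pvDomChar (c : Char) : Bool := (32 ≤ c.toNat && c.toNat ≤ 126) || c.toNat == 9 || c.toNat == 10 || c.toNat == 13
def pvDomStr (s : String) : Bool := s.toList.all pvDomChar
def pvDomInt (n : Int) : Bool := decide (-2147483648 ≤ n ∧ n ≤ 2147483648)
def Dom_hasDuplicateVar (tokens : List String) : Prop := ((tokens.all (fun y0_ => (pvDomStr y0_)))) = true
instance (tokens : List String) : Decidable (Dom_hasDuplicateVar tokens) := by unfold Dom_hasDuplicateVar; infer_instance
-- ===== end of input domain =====

-- B detects the duplicate by sorting the extracted names and scanning for an equal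
-- adjacent pair, instead of A's list-length-versus-set-length comparison: alternative algorithm.

-- ===== PORT A =====
def hasDataType (line : String) : Bool :=
  if PySem.Str.isIn "double" line || PySem.Str.isIn "int" line || PySem.Str.isIn "char" line
      || PySem.Str.isIn "float" line || PySem.Str.isIn "void" line || PySem.Str.isIn "return" line then
    true
  else
    false

def hasDuplicateVar (tokens : List String) : Bool :=
  let vars_ := tokens.foldl (fun vars token =>
    if PySem.Str.isIn "=" token then
      -- token.split("=")[0]: sep "=" is nonempty so split? = some of a nonempty list; [0] never raises
      vars ++ [((PySem.Str.split? token "=").getD []).headD ""]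
    else if !hasDataType token then
      vars ++ [token]
    else vars) []
  if vars_.length = (PySem.Set.ofList vars_).length then false else true

-- ===== PORT B =====
-- _name of Source B: the candidate name of one token (none = token contributes no name)
def nameOf? (token : String) : Option String :=
  if PySem.Str.isIn "=" token then some (((PySem.Str.split? token "=").getD []).headD "")
  else if !hasDataType token then some token
  else none

-- the 'for a, b in zip(names, names[1:]): if a == b: return True' scan of Source B
def adjEq : List String → Bool
  | a :: b :: rest => if a == b then true else adjEq (b :: rest)
  | _ => false

def hasDuplicateVar_alt (tokens : List String) : Bool :=
  let names := PySem.List.sorted (tokens.filterMap nameOf?) (fun x => x) false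
  adjEq names

-- ===== PRECONDITION & SPEC =====
def Spec_hasDuplicateVar (tokens : List String) (out : Bool) : Prop := out = hasDuplicateVar_alt tokens
instance (tokens : List String) (out : Bool) : Decidable (Spec_hasDuplicateVar tokens out) := by unfold Spec_hasDuplicateVar; infer_instance

-- ===== CLAIM (what is proved, stated in full; the proofs are below) =====
def Claim_equal_hasDuplicateVar : Prop := ∀ (tokens : List String), Dom_hasDuplicateVar tokens → Spec_hasDuplicateVar tokens (hasDuplicateVar tokens)

-- ===== LEMMAS AND PROOFS =====

lemma set_add_mem (s : List String) (a : String) (h : a ∈ s) :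
    PySem.Set.add s a = s := by
  simp [PySem.Set.add, PySem.Set.contains, h]

lemma set_add_not_mem (s : List String) (a : String) (h : a ∉ s) :
    PySem.Set.add s a = s ++ [a] := by
  simp [PySem.Set.add, PySem.Set.contains, h]

-- A's loop body appends exactly the candidate name (if any)
lemma bodyA_eq (vars : List String) (token : String) :
    (if PySem.Str.isIn "=" token then vars ++ [((PySem.Str.split? token "=").getD []).headD ""]
     else if !hasDataType token then vars ++ [token]
     else vars) = vars ++ (nameOf? token).toList := by
  unfold nameOf?
  split_ifs <;> simp

lemma foldl_appendOpt (ts : List String) (init : List String) :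
    ts.foldl (fun vs t => vs ++ (nameOf? t).toList) init = init ++ ts.filterMap nameOf? := by
  induction ts generalizing init with
  | nil => simp
  | cons t ts ih =>
    simp only [List.foldl_cons, List.filterMap_cons, ih]
    cases nameOf? t <;> simp

lemma foldlA_eq_filterMap (tokens : List String) :
    tokens.foldl (fun vars token =>
      if PySem.Str.isIn "=" token then
        vars ++ [((PySem.Str.split? token "=").getD []).headD ""]
      else if !hasDataType token then vars ++ [token]
      else vars) [] = tokens.filterMap nameOf? := by
  have hbody : (fun (vars : List String) (token : String) =>
      if PySem.Str.isIn "=" token then vars ++ [((PySem.Str.split? token "=").getD []).headD ""]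
      else if !hasDataType token then vars ++ [token]
      else vars) = fun vs t => vs ++ (nameOf? t).toList :=
    funext fun v => funext fun t => bodyA_eq v t
  rw [hbody, foldl_appendOpt]
  simp

lemma foldl_add_len_le (L : List String) (s : List String) :
    (L.foldl PySem.Set.add s).length ≤ s.length + L.length := by
  induction L generalizing s with
  | nil => simp
  | cons a L ih =>
    simp only [List.foldl_cons]
    refine le_trans (ih _) ?_
    by_cases h : a ∈ s
    · rw [set_add_mem s a h]; simp
    · rw [set_add_not_mem s a h]; simp; omega

lemma foldl_add_len_iff (L : List String) (s : List String) (hs : s.Nodup) :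
    (L.foldl PySem.Set.add s).length = s.length + L.length ↔ (s ++ L).Nodup := by
  induction L generalizing s with
  | nil => simpa using hs
  | cons a L ih =>
    simp only [List.foldl_cons]
    by_cases h : a ∈ s
    · rw [set_add_mem s a h]
      have hle := foldl_add_len_le L s
      constructor
      · intro hlen; simp at hlen; omega
      · intro hnd
        exact absurd List.mem_cons_self (List.disjoint_of_nodup_append hnd h)
    · rw [set_add_not_mem s a h]
      have hs' : (s ++ [a]).Nodup :=
        List.Nodup.append hs (List.nodup_singleton a)
          (fun x hx hxa => h ((List.mem_singleton.mp hxa) ▸ hx))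
      have h' := ih (s ++ [a]) hs'
      have hlen : (s ++ [a]).length + L.length = s.length + (a :: L).length := by simp; omega
      have hassoc : ((s ++ [a]) ++ L) = s ++ a :: L := by simp
      rw [hlen, hassoc] at h'
      exact h'

-- on a (≤)-sorted list, no equal adjacent pair ⟺ no duplicates at all
lemma adjEq_sorted_iff (l : List String) (hp : l.Pairwise (· ≤ ·)) :
    adjEq l = false ↔ l.Nodup := by
  induction l with
  | nil => simp [adjEq]
  | cons a t ih =>
    cases t with
    | nil => simp [adjEq]
    | cons b t' =>
      rcases List.pairwise_cons.mp hp with ⟨hale, hp'⟩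
      by_cases hab : a = b
      · subst hab
        simp [adjEq]
      · have hlt : a < b := lt_of_le_of_ne (hale b List.mem_cons_self) hab
        have step : adjEq (a :: b :: t') = adjEq (b :: t') := by
          simp [adjEq, hab]
        rw [step, ih hp']
        constructor
        · intro hnd
          refine List.nodup_cons.mpr ⟨?_, hnd⟩
          intro hmem
          rcases List.mem_cons.mp hmem with h | h
          · exact hab h
          · rcases List.pairwise_cons.mp hp' with ⟨hble, _⟩
            exact absurd (lt_of_lt_of_le hlt (hble a h)) (lt_irrefl a)
        · intro hnd
          exact (List.nodup_cons.mp hnd).2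

-- ===== VERDICT (by name: the statement is the Claim_ definition above) =====
theorem hasDuplicateVar_spec : Claim_equal_hasDuplicateVar := by
  intro tokens _
  unfold Spec_hasDuplicateVar hasDuplicateVar hasDuplicateVar_alt
  rw [foldlA_eq_filterMap]
  set L := tokens.filterMap nameOf? with hL
  have hset : (PySem.Set.ofList L).length = L.length ↔ L.Nodup := by
    have := foldl_add_len_iff L [] List.nodup_nil
    simpa [PySem.Set.ofList] using this
  have hperm : (PySem.List.sorted L (fun x => x) false).Perm L := PySem.List.sorted_perm L _ _
  have hpw : (PySem.List.sorted L (fun x => x) false).Pairwise (· ≤ ·) := by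
    simpa using PySem.List.sorted_pairwise L (fun x => x)
  have hadj := adjEq_sorted_iff _ hpw
  rw [hperm.nodup_iff] at hadj
  by_cases hnd : L.Nodup
  · have h1 : L.length = (PySem.Set.ofList L).length := (hset.mpr hnd).symm
    simp [h1.symm, hadj.mpr hnd]
  · have h1 : ¬ L.length = (PySem.Set.ofList L).length := fun h => hnd (hset.mp h.symm)
    have h2 : adjEq (PySem.List.sorted L (fun x => x) false) = true := by
      cases hb : adjEq (PySem.List.sorted L (fun x => x) false)
      · exact absurd (hadj.mp hb) hnd
      · rfl
    simp [h1, h2]
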